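-- pv_equiv track=rewrite | github.com/AP-MI-2021/lab-3-CristiCH2002 | main.py | get_longest_all_not_prime
-- ===== SOURCE A (Python) =====
-- def prim(n):
--     '''
--     Determina daca n este nr prim
--     :param n:int,nr pe care vrem sa il verificam
--     :return:True/False
--     '''
--     if n<2:
--         return False
--     for i in range(2,n-1):
--         if n%i==0:
--             return False
--     return True
--
-- def get_longest_all_not_prime(lst):
--     '''
--     Determina cea mai lunga subsecventa de nr neprime
--     :param lst:list,lista de nr
--     :return:list,subsecventa data
--     '''
--     j=-1
--     lmax=0
--     l=0
--     for i,el in enumerate(lst):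
--         if not prim(el):
--             l=l+1
--         else:
--             l=0
--         if l>lmax:
--             lmax=l
--             j=i
--     rez=[]
--     for i in range(j-lmax+1,j+1):
--         rez.append(lst[i])
--     return rez
-- ===== SOURCE B (Python) =====
-- def prim(n):
--     if n < 2:
--         return False
--     for i in range(2, n - 1):
--         if n % i == 0:
--             return False
--     return True
--
-- def get_longest_all_not_prime(lst):
--     runs = []
--     cur = []
--     for el in lst:
--         if not prim(el):
--             cur.append(el)
--         else:
--             if cur:
--                 runs.append(cur)
--             cur = []
--     if cur:
--         runs.append(cur)
--     return max(runs, key=len, default=[])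
-- ===== Notes on version B (the rewrite author's own statement) =====
-- stated objective: alternative
-- what changed: A scans with an index/counter state (j, lmax, l) and then rebuilds the answer by a second index loop over the list; B makes one pass collecting the maximal non-prime runs themselves and returns the first longest run with max(runs, key=len, default=[]) -- no index arithmetic and no second indexing pass.
import Mathlib
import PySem

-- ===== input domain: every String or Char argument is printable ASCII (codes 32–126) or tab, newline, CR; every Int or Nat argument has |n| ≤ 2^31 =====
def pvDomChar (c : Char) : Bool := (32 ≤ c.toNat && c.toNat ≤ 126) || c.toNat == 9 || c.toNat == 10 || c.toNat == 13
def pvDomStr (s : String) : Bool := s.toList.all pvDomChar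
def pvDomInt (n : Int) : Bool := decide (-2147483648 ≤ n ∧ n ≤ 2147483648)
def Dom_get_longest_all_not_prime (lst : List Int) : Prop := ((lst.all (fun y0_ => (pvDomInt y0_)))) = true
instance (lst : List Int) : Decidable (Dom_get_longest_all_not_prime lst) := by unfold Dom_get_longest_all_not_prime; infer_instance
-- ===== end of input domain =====

-- B replaces A's index/counter scan (j, lmax, l) plus a second index loop with a single
-- structural pass that collects the maximal non-prime runs and takes the first longest one.

-- ===== PORT A =====
-- shared helper: Python's prim(n); the for-loop 'for i in range(2, n-1)' with its early
-- return is ported as a recursion over the (n-3).toNat remaining iterations, i starting at 2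
def primAux (n : Int) : Nat → Int → Bool
  | 0, _ => true
  | fuel + 1, i => if PySem.Int.mod n i == 0 then false else primAux n fuel (i + 1)

def prim (n : Int) : Bool :=
  if n < 2 then false else primAux n (n - 3).toNat 2

-- A's first loop body: state (j, lmax, l), p = (i, el) from enumerate(lst)
def stepA (st : Int × Int × Int) (p : Int × Int) : Int × Int × Int :=
  let l := if !(prim p.2) then st.2.2 + 1 else 0
  if l > st.2.1 then (p.1, l, l) else (st.1, st.2.1, l)

-- A's second loop: rez = []; for i in range(j-lmax+1, j+1): rez.append(lst[i]).
-- The index i is provably in range here (0 ≤ j-lmax+1, j < len(lst)), so pyGetD's default is never used.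
def rebuildA (lst : List Int) (j lmax : Int) : List Int :=
  (PySem.List.pyRange (j - lmax + 1) (j + 1)).foldl (fun acc i => acc ++ [PySem.List.pyGetD lst i 0]) []

def get_longest_all_not_prime (lst : List Int) : List Int :=
  let st := (PySem.List.enumerate lst).foldl stepA (-1, 0, 0)
  rebuildA lst st.1 st.2.1

-- ===== PORT B =====
-- B's loop body: state (runs, cur)
def stepB (st : List (List Int) × List Int) (el : Int) : List (List Int) × List Int :=
  if !(prim el) then (st.1, st.2 ++ [el])
  else if st.2 ≠ [] then (st.1 ++ [st.2], []) else st

def get_longest_all_not_prime_alt (lst : List Int) : List Int :=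
  let st := lst.foldl stepB ([], [])
  let runs := if st.2 ≠ [] then st.1 ++ [st.2] else st.1
  PySem.List.maxD runs (fun r => r.length) []

-- ===== PRECONDITION & SPEC =====
def Spec_get_longest_all_not_prime (lst : List Int) (out : List Int) : Prop := out = get_longest_all_not_prime_alt lst
instance (lst : List Int) (out : List Int) : Decidable (Spec_get_longest_all_not_prime lst out) := by unfold Spec_get_longest_all_not_prime; infer_instance

-- ===== CLAIM (what is proved, stated in full; the proofs are below) =====
def Claim_equal_get_longest_all_not_prime : Prop := ∀ (lst : List Int), Dom_get_longest_all_not_prime lst → Spec_get_longest_all_not_prime lst (get_longest_all_not_prime lst)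

-- ===== LEMMAS AND PROOFS =====

-- B's final extraction, as a function of the loop state
def extractB (st : List (List Int) × List Int) : List Int :=
  PySem.List.maxD (if st.2 ≠ [] then st.1 ++ [st.2] else st.1) (fun r => r.length) []

-- the invariant tying A's (j, lmax, l) to B's (runs, cur) after k elements
def LoopInv (lst : List Int) (k : Nat) (j lmax l : Int) (runs : List (List Int)) (cur : List Int) : Prop :=
  (cur.length : Int) = l ∧
  cur = (lst.take k).drop (k - cur.length) ∧
  (∀ r ∈ runs, r ≠ [] ∧ (r.length : Int) ≤ lmax) ∧
  l ≤ lmax ∧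
  ((lmax = 0 ∧ j = -1 ∧ runs = [] ∧ cur = []) ∨
   (0 < lmax ∧ lmax - 1 ≤ j ∧ j < (k : Int) ∧ 0 ≤ j ∧
    extractB (runs, cur) = rebuildA lst j lmax ∧
    ((∃ r ∈ runs, (r.length : Int) = lmax) ∨ (cur.length : Int) = lmax)))

lemma enumerate_cons {α : Type} (x : α) (xs : List α) (s : Int) :
    PySem.List.enumerate (x :: xs) s = (s, x) :: PySem.List.enumerate xs (s + 1) := rfl

lemma max?_append_singleton {α : Type} (xs : List α) (x : α) (key : α → Nat) :
    PySem.List.max? (xs ++ [x]) key =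
      match PySem.List.max? xs key with
      | none => some x
      | some m => if key m < key x then some x else some m := by
  simp only [PySem.List.max?, List.foldl_append, List.foldl_cons, List.foldl_nil]
  rfl

-- slice lemma: A's rebuild loop over range(a, b) produces lst[a:b]
lemma rebuild_slice (lst : List Int) : ∀ (n a : Nat), a + n ≤ lst.length →
    (PySem.List.pyRange (a : Int) ((a + n : Nat) : Int)).foldl
      (fun acc i => acc ++ [PySem.List.pyGetD lst i 0]) [] = (lst.take (a + n)).drop a := by
  intro n
  induction n with
  | zero =>
    intro a ha
    have : PySem.List.pyRange (a : Int) (a : Int) = [] := by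
      simp [PySem.List.pyRange]
    simp [this]
  | succ n ih =>
    intro a ha
    have hle : (a : Int) ≤ ((a + n : Nat) : Int) := by push_cast; omega
    have hcast : ((a + (n + 1) : Nat) : Int) = ((a + n : Nat) : Int) + 1 := by push_cast; omega
    rw [hcast, PySem.List.pyRange_one_succ_right hle, List.foldl_append]
    rw [ih a (by omega)]
    have hlt : a + n < lst.length := by omega
    have hget : PySem.List.pyGetD lst ((a + n : Nat) : Int) 0 = lst[a + n] := by
      rw [PySem.List.pyGetD_eq_getElem lst 0 (by positivity) (by exact_mod_cast hlt)]
      congr 1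
    simp only [List.foldl_cons, List.foldl_nil, hget]
    have htake : lst.take (a + (n + 1)) = lst.take (a + n) ++ [lst[a + n]] := by
      rw [show a + (n + 1) = (a + n) + 1 by omega, List.take_add_one]
      simp [List.getElem?_eq_getElem hlt]
    rw [htake, List.drop_append_of_le_length (by simp; omega)]

-- key step facts about extractB
lemma extractB_flush (runs : List (List Int)) (cur : List Int) :
    extractB (if cur ≠ [] then runs ++ [cur] else runs, ([] : List Int)) = extractB (runs, cur) := by
  by_cases h : cur = [] <;> simp [extractB, h]

lemma extractB_new_max (runs : List (List Int)) (c : List Int)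
    (h : ∀ r ∈ runs, r.length < c.length) (hc : c ≠ []) :
    extractB (runs, c) = c := by
  simp only [extractB, if_pos hc, PySem.List.maxD, max?_append_singleton]
  cases hm : PySem.List.max? runs (fun r => r.length) with
  | none => simp
  | some m =>
    have := h m (PySem.List.max?_mem hm)
    simp [this]

-- the running fold of max? never returns to none once it holds a value
lemma max?_foldl_some_ne_none {α : Type} (key : α → Nat) : ∀ (as : List α) (a : α),
    (List.foldl (fun acc x =>
        match acc with
        | none => some x
        | some m => if key m < key x then some x else some m) (some a) as) ≠ none := by
  intro as
  induction as with
  | nil => intro a; simp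
  | cons b bs ih =>
    intro a
    simp only [List.foldl_cons]
    split <;> exact ih _

lemma extractB_grow (runs : List (List Int)) (c c' : List Int)
    (hach : ∃ r ∈ runs, c.length ≤ r.length ∧ c'.length ≤ r.length) :
    extractB (runs, c') = extractB (runs, c) := by
  obtain ⟨r, hr, hc, hc'⟩ := hach
  have key : ∀ (d : List Int), d.length ≤ r.length →
      PySem.List.maxD (if d ≠ [] then runs ++ [d] else runs) (fun x => x.length) [] =
      PySem.List.maxD runs (fun x => x.length) [] := by
    intro d hd
    by_cases hdn : d = []
    · simp [hdn]
    · simp only [if_pos hdn, PySem.List.maxD, max?_append_singleton]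
      cases hm : PySem.List.max? runs (fun x => x.length) with
      | none => cases hm' : runs with
        | nil => exact absurd (hm' ▸ hr) (List.not_mem_nil)
        | cons a as =>
          rw [hm'] at hm
          simp only [PySem.List.max?, List.foldl_cons] at hm
          exact absurd hm (max?_foldl_some_ne_none (fun x : List Int => x.length) as a)
      | some m =>
        have hmax := PySem.List.max?_isMax hm r hr
        have : ¬ (m.length < d.length) := by omega
        simp [this]
  · simp only [extractB]
    rw [key c' hc', key c hc]

-- the main induction: from any related pair of states, the two remaining folds agree
lemma main_inv (lst : List Int) : ∀ (rest : List Int) (k : Nat) (j lmax l : Int)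
    (runs : List (List Int)) (cur : List Int),
    rest = lst.drop k → k ≤ lst.length → LoopInv lst k j lmax l runs cur →
    (let st := (PySem.List.enumerate rest (k : Int)).foldl stepA (j, lmax, l)
     rebuildA lst st.1 st.2.1) =
    extractB (rest.foldl stepB (runs, cur)) := by
  intro rest
  induction rest with
  | nil =>
    intro k j lmax l runs cur _ _ hinv
    obtain ⟨hl, hcur, hruns, hllm, hdisj⟩ := hinv
    simp only [PySem.List.enumerate, List.foldl_nil]
    rcases hdisj with ⟨h0, hj, hrn, hc0⟩ | ⟨_, _, _, _, heq, _⟩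
    · subst h0; subst hj; subst hrn; subst hc0
      have : PySem.List.pyRange (0 : Int) (0 : Int) = [] := by decide
      simp [rebuildA, extractB, this, PySem.List.maxD, PySem.List.max?]
    · exact heq.symm
  | cons el rest' ih =>
    intro k j lmax l runs cur hrest hk hinv
    obtain ⟨hl, hcur, hruns, hllm, hdisj⟩ := hinv
    have hklt : k < lst.length := by
      by_contra h
      have hnil : lst.drop k = [] := List.drop_eq_nil_of_le (by omega)
      rw [hnil] at hrest
      exact absurd hrest (by simp)
    have hsplit : lst[k] :: lst.drop (k + 1) = el :: rest' := by
      rw [← List.drop_eq_getElem_cons hklt]; exact hrest.symm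
    have hel : lst[k] = el := (List.cons.injEq _ _ _ _ ▸ hsplit).1
    have hrest' : rest' = lst.drop (k + 1) := ((List.cons.injEq _ _ _ _ ▸ hsplit).2).symm
    have hcurlen : cur.length ≤ k := by
      have h := congrArg List.length hcur
      simp [Nat.min_def] at h
      omega
    have hl0 : 0 ≤ l := by omega
    rw [enumerate_cons, List.foldl_cons, List.foldl_cons]
    by_cases hp : prim el = true
    · -- prime: l resets to 0, B flushes cur
      have hstepA : stepA (j, lmax, l) ((k : Int), el) = (j, lmax, 0) := by
        simp only [stepA, hp]
        have : ¬ ((0 : Int) > lmax) := by omega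
        simp [this]
      have hstepB : stepB (runs, cur) el = (if cur ≠ [] then runs ++ [cur] else runs, []) := by
        simp only [stepB, hp]
        by_cases hc : cur = [] <;> simp [hc]
      rw [hstepA, hstepB]
      apply ih (k + 1) j lmax 0 _ [] hrest' (by omega)
      refine ⟨by simp, by simp, ?_, by omega, ?_⟩
      · intro r hr
        by_cases hc : cur = []
        · rw [if_neg (by simp [hc])] at hr; exact hruns r hr
        · rw [if_pos hc] at hr
          rcases List.mem_append.mp hr with h | h
          · exact hruns r h
          · simp at h; subst h; exact ⟨hc, by omega⟩
      · rcases hdisj with ⟨h0, hj, hrn, hc0⟩ | ⟨hpos, hjl, hjk, hj0, heq, hach⟩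
        · left; exact ⟨h0, hj, by simp [hc0, hrn], rfl⟩
        · right
          refine ⟨hpos, hjl, by push_cast; omega, hj0, ?_, ?_⟩
          · rw [extractB_flush]; exact heq
          · left
            rcases hach with ⟨r, hr, hrl⟩ | hcl
            · refine ⟨r, ?_, hrl⟩
              by_cases hc : cur = [] <;> simp [hc, hr]
            · have hc : cur ≠ [] := by
                intro h; rw [h] at hcl; simp at hcl; omega
              exact ⟨cur, by simp [hc], hcl⟩
    · -- non-prime: l increments, B appends to cur
      have hpb : prim el = false := by simpa using hp
      have hstepB : stepB (runs, cur) el = (runs, cur ++ [el]) := by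
        simp [stepB, hpb]
      have hcur' : cur ++ [el] = (lst.take (k + 1)).drop (k + 1 - (cur ++ [el]).length) := by
        have htake : lst.take (k + 1) = lst.take k ++ [lst[k]] := by
          rw [List.take_add_one]; simp [List.getElem?_eq_getElem hklt]
        rw [htake, hel]
        have : k + 1 - (cur ++ [el]).length = k - cur.length := by simp
        rw [this, List.drop_append_of_le_length (by simp; omega), ← hcur]
      by_cases hgt : l + 1 > lmax
      · -- new maximum: j := k, lmax := l + 1
        have hstepA : stepA (j, lmax, l) ((k : Int), el) = ((k : Int), l + 1, l + 1) := by
          simp [stepA, hpb, hgt]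
        rw [hstepA, hstepB]
        apply ih (k + 1) (k : Int) (l + 1) (l + 1) runs (cur ++ [el]) hrest' (by omega)
        refine ⟨by simp; omega, hcur', ?_, by omega, ?_⟩
        · intro r hr; exact ⟨(hruns r hr).1, by have := (hruns r hr).2; omega⟩
        · right
          refine ⟨by omega, by omega, by push_cast; omega, by positivity, ?_, Or.inr (by simp; omega)⟩
          have hA : rebuildA lst (k : Int) (l + 1) = cur ++ [el] := by
            unfold rebuildA
            have hrw : (PySem.List.pyRange ((k : Int) - (l + 1) + 1) ((k : Int) + 1)) =
                PySem.List.pyRange ((k - cur.length : Nat) : Int) (((k - cur.length) + (cur.length + 1) : Nat) : Int) := by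
              congr 1 <;> push_cast <;> omega
            rw [hrw, rebuild_slice lst (cur.length + 1) (k - cur.length) (by omega)]
            have : (k - cur.length) + (cur.length + 1) = k + 1 := by omega
            rw [this]
            rw [hcur']; congr 1; simp
          rw [hA]
          exact extractB_new_max runs (cur ++ [el])
            (fun r hr => by have h1 := (hruns r hr).2; simp; omega) (by simp)
      · -- l + 1 ≤ lmax: A's state keeps (j, lmax); B's longest run is already in runs
        have hstepA : stepA (j, lmax, l) ((k : Int), el) = (j, lmax, l + 1) := by
          simp [stepA, hpb, hgt]
        rw [hstepA, hstepB]
        apply ih (k + 1) j lmax (l + 1) runs (cur ++ [el]) hrest' (by omega)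
        have hach : ∃ r ∈ runs, (r.length : Int) = lmax := by
          rcases hdisj with ⟨h0, _, _, _⟩ | ⟨_, _, _, _, _, hach⟩
          · omega
          · rcases hach with h | hcl
            · exact h
            · omega
        refine ⟨by simp; omega, hcur', hruns, by omega, ?_⟩
        right
        rcases hdisj with ⟨h0, _, _, _⟩ | ⟨hpos, hjl, hjk, hj0, heq, _⟩
        · omega
        refine ⟨hpos, hjl, by push_cast; omega, hj0, ?_, Or.inl hach⟩
        rw [← heq]
        obtain ⟨r, hr, hrl⟩ := hach
        exact extractB_grow runs cur (cur ++ [el]) ⟨r, hr, by omega, by simp; omega⟩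
    
-- ===== VERDICT (by name: the statement is the Claim_ definition above) =====
theorem get_longest_all_not_prime_spec : Claim_equal_get_longest_all_not_prime := by
  intro lst _
  unfold Spec_get_longest_all_not_prime get_longest_all_not_prime get_longest_all_not_prime_alt
  have h := main_inv lst lst 0 (-1) 0 0 [] [] (by simp) (by simp)
    ⟨by simp, by simp, by simp, le_refl 0, Or.inl ⟨rfl, rfl, rfl, rfl⟩⟩
  simpa [extractB] using h
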